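-- pv_equiv track=rewrite | github.com/alok1974/pychess | src/pychess/gui/imager.py | _get_title_images_square_sizes
-- ===== SOURCE A (Python) =====
-- def _get_title_images_square_sizes(w, h, n):
--     nw, rw = divmod(w, n)
--     nh, rh = divmod(h, n)
--
--     last_w = nw + rw
--     last_h = nh + rh
--
--     row = [
--         (nw, nh)
--         for i in range(n - 1)
--
--     ]
--     row.append((last_w, nh))
--
--     last_row = [
--         (nw, last_h)
--         for _ in range(n - 1)
--     ]
--     last_row.append((last_w, last_h))
--
--     sizes = [row for _ in range(n - 1)]
--     sizes.append(last_row)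
--     return sizes
-- ===== SOURCE B (Python) =====
-- def _get_title_images_square_sizes(w, h, n):
--     nw, rw = divmod(w, n)
--     nh, rh = divmod(h, n)
--     widths = [nw] * (n - 1) + [nw + rw]
--     heights = [nh] * (n - 1) + [nh + rh]
--     return [[(wj, hi) for wj in widths] for hi in heights]
-- ===== Notes on version B (the rewrite author's own statement) =====
-- stated objective: simpler
-- what changed: B precomputes a width vector and a height vector and builds every cell with one nested comprehension over them, instead of templating an interior row, appending the last cell and replicating the row object.
-- outside the precondition, e.g. on _get_title_images_square_sizes(7, 5, 0): A raises ZeroDivisionError, B raises ZeroDivisionError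
import Mathlib
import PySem

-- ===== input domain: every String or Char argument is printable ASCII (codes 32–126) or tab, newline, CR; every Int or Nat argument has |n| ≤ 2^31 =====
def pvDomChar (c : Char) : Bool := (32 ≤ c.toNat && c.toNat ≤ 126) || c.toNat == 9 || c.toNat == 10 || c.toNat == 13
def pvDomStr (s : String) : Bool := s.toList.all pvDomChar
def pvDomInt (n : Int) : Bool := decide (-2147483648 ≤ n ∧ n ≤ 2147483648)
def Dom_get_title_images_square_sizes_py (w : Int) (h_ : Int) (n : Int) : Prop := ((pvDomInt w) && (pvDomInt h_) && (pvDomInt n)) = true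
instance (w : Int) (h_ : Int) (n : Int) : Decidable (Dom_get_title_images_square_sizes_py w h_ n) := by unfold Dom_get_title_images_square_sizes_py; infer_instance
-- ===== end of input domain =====

-- B builds the grid from a precomputed width vector and height vector with one nested
-- comprehension, instead of templating an interior row and replicating it (objective: simpler).
-- A aliases the same interior-row object across rows; equivalence here is about the value only.

-- ===== PORT A =====
def get_title_images_square_sizes_py (w : Int) (h_ : Int) (n : Int) : List (List (Int × Int)) :=
  let nw := PySem.Int.floordiv w n
  let rw := PySem.Int.mod w n
  let nh := PySem.Int.floordiv h_ n
  let rh := PySem.Int.mod h_ n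
  let last_w := nw + rw
  let last_h := nh + rh
  let row := ((PySem.List.pyRange 0 (n - 1) 1).map (fun _ => (nw, nh))) ++ [(last_w, nh)]
  let last_row := ((PySem.List.pyRange 0 (n - 1) 1).map (fun _ => (nw, last_h))) ++ [(last_w, last_h)]
  ((PySem.List.pyRange 0 (n - 1) 1).map (fun _ => row)) ++ [last_row]

-- ===== PORT B =====
def get_title_images_square_sizes_py_alt (w : Int) (h_ : Int) (n : Int) : List (List (Int × Int)) :=
  let nw := PySem.Int.floordiv w n
  let rw := PySem.Int.mod w n
  let nh := PySem.Int.floordiv h_ n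
  let rh := PySem.Int.mod h_ n
  let widths := List.replicate (n - 1).toNat nw ++ [nw + rw]
  let heights := List.replicate (n - 1).toNat nh ++ [nh + rh]
  heights.map (fun hi => widths.map (fun wj => (wj, hi)))

-- ===== PRECONDITION & SPEC =====
-- Python's divmod raises ZeroDivisionError when n = 0 (both A and B raise there).
def Pre_get_title_images_square_sizes_py (w : Int) (h_ : Int) (n : Int) : Prop := n ≠ 0
instance (w : Int) (h_ : Int) (n : Int) : Decidable (Pre_get_title_images_square_sizes_py w h_ n) := by unfold Pre_get_title_images_square_sizes_py; infer_instance
def pvWitness_get_title_images_square_sizes_py : Int × Int × Int := (7, 5, 3)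

def Spec_get_title_images_square_sizes_py (w : Int) (h_ : Int) (n : Int) (out : List (List (Int × Int))) : Prop := out = get_title_images_square_sizes_py_alt w h_ n
instance (w : Int) (h_ : Int) (n : Int) (out : List (List (Int × Int))) : Decidable (Spec_get_title_images_square_sizes_py w h_ n out) := by unfold Spec_get_title_images_square_sizes_py; infer_instance

-- ===== CLAIM (what is proved, stated in full; the proofs are below) =====
def Claim_equal_get_title_images_square_sizes_py : Prop := ∀ (w : Int) (h_ : Int) (n : Int), Dom_get_title_images_square_sizes_py w h_ n → Pre_get_title_images_square_sizes_py w h_ n → Spec_get_title_images_square_sizes_py w h_ n (get_title_images_square_sizes_py w h_ n)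

-- ===== LEMMAS AND PROOFS =====
theorem map_const_pyRange (t : Int) {α : Type} (x : α) :
    (PySem.List.pyRange 0 t 1).map (fun _ => x) = List.replicate t.toNat x := by
  rw [PySem.List.pyRange_one, List.map_map]
  simp [Function.comp_def]

-- ===== VERDICT (by name: the statement is the Claim_ definition above) =====
theorem get_title_images_square_sizes_py_spec : Claim_equal_get_title_images_square_sizes_py := by
  intro w h_ n _ _
  unfold Spec_get_title_images_square_sizes_py
  unfold get_title_images_square_sizes_py get_title_images_square_sizes_py_alt
  simp only [map_const_pyRange, List.map_append, List.map_replicate,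
    List.map_cons, List.map_nil]
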